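-- pv_equiv track=rewrite | github.com/SpadeNine/X | FM9G4B-V/resampler.py | partition_list
-- ===== SOURCE A (Python) =====
-- def partition_list(input_list, lengths):
--     """
--     按照指定的长度划分列表。
--
--     参数:
--     input_list (list): 要划分的原始列表。
--     lengths (list): 一个包含划分长度的整数列表。
--
--     返回:
--     list: 一个包含子列表的列表，每个子列表的长度由 lengths 指定。
--     """
--     result = []
--     current_index = 0
--     for length in lengths:
--         if current_index + length > len(input_list):
--             raise ValueError("划分长度超过了列表的总长度")
--         sublist = input_list[current_index:current_index + length]
--         result.append(sublist)
--         current_index += length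
--     if current_index != len(input_list):
--         raise ValueError("划分长度和列表总长度不一致")
--     return result
-- ===== SOURCE B (Python) =====
-- def partition_list(input_list, lengths):
--     n = len(input_list)
--     bounds = [0]
--     for length in lengths:
--         bounds.append(bounds[-1] + length)
--     for b in bounds[1:]:
--         if b > n:
--             raise ValueError("划分长度超过了列表的总长度")
--     if bounds[-1] != n:
--         raise ValueError("划分长度和列表总长度不一致")
--     return [input_list[a:b] for a, b in zip(bounds, bounds[1:])]
-- ===== Notes on version B (the rewrite author's own statement) =====
-- stated objective: alternative
-- what changed: B first builds the full table of cumulative boundary offsets, validates all boundaries against the list length and the final total, and then slices consecutive boundary pairs in a comprehension, instead of A's single incremental slice-check-append loop with a running index.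
import Mathlib
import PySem

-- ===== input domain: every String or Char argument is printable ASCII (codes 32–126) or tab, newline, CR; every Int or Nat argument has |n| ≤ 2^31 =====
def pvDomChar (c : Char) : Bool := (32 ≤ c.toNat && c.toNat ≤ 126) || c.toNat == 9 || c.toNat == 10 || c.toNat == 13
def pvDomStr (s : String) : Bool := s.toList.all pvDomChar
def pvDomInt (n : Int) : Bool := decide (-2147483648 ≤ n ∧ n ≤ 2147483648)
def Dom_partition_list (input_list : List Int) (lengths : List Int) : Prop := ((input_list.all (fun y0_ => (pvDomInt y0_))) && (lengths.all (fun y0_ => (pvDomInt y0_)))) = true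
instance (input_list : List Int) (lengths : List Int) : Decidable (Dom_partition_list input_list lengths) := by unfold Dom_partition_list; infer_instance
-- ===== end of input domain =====

-- B builds the full cumulative-boundary table first, validates it, then slices consecutive
-- boundary pairs; A keeps a running index and slices/validates incrementally (alternative decomposition).

-- ===== PORT A =====
-- A's loop: state (result, current_index); 'raise' is modelled as none, returns getD [] (outside Pre_).
def partAuxA (input_list : List Int) : List Int → List (List Int) → Int → Option (List (List Int))
  | [], result, ci =>
      if ci ≠ (input_list.length : Int) then none else some result
  | length :: rest, result, ci =>
      if ci + length > (input_list.length : Int) then none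
      else partAuxA input_list rest (result ++ [PySem.List.slice input_list (some ci) (some (ci + length))]) (ci + length)

def partition_list (input_list : List Int) (lengths : List Int) : List (List Int) :=
  (partAuxA input_list lengths [] 0).getD []

-- ===== PORT B =====
def partition_list_alt (input_list : List Int) (lengths : List Int) : List (List Int) :=
  let n : Int := input_list.length
  let bounds : List Int := lengths.foldl (fun bs length => bs ++ [bs.getLastD 0 + length]) [0]
  let r : Option (List (List Int)) :=
    if bounds.tail.any (fun b => decide (b > n)) then none
    else if bounds.getLastD 0 ≠ n then none
    else some ((bounds.zip bounds.tail).map (fun p => PySem.List.slice input_list (some p.1) (some p.2)))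
  r.getD []

-- ===== PRECONDITION & SPEC =====
-- Pre_: exactly the inputs where A raises no ValueError: every cumulative prefix sum of
-- lengths stays within len(input_list) and the total equals len(input_list).
def Pre_partition_list (input_list : List Int) (lengths : List Int) : Prop :=
  (∀ s ∈ lengths.scanl (· + ·) 0, s ≤ (input_list.length : Int)) ∧ lengths.sum = (input_list.length : Int)
instance (input_list : List Int) (lengths : List Int) : Decidable (Pre_partition_list input_list lengths) := by unfold Pre_partition_list; infer_instance

def pvWitness_partition_list : List Int × List Int := ([1, 2, 3, 4, 5], [2, 0, 3])

def Spec_partition_list (input_list : List Int) (lengths : List Int) (out : List (List Int)) : Prop := out = partition_list_alt input_list lengths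
instance (input_list : List Int) (lengths : List Int) (out : List (List Int)) : Decidable (Spec_partition_list input_list lengths out) := by unfold Spec_partition_list; infer_instance

-- ===== CLAIM (what is proved, stated in full; the proofs are below) =====
def Claim_equal_partition_list : Prop := ∀ (input_list : List Int) (lengths : List Int), Dom_partition_list input_list lengths → Pre_partition_list input_list lengths → Spec_partition_list input_list lengths (partition_list input_list lengths)

-- ===== LEMMAS AND PROOFS =====

-- canonical intermediate forms (proof-only helpers)
def offs (ci : Int) : List Int → List Int
  | [] => []
  | L :: r => (ci + L) :: offs (ci + L) r

def lastOff (ci : Int) : List Int → Int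
  | [] => ci
  | L :: r => lastOff (ci + L) r

def slicesOf (il : List Int) (ci : Int) : List Int → List (List Int)
  | [] => []
  | L :: r => PySem.List.slice il (some ci) (some (ci + L)) :: slicesOf il (ci + L) r

def canon (il : List Int) (ci : Int) (ls : List Int) : Option (List (List Int)) :=
  if (offs ci ls).any (fun b => decide (b > (il.length : Int))) then none
  else if lastOff ci ls ≠ (il.length : Int) then none
  else some (slicesOf il ci ls)

theorem partAuxA_canon (il : List Int) (ls : List Int) :
    ∀ (ci : Int) (res : List (List Int)),
      partAuxA il ls res ci = (canon il ci ls).map (fun t => res ++ t) := by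
  induction ls with
  | nil =>
      intro ci res
      simp [partAuxA, canon, offs, lastOff, slicesOf]
  | cons L r ih =>
      intro ci res
      simp only [partAuxA, canon, offs, lastOff, slicesOf]
      by_cases h : ci + L > (il.length : Int)
      · simp [h]
      · rw [if_neg h, ih]
        simp only [canon, List.any_cons]
        split_ifs <;> simp_all
        · rcases ‹_ ∨ _› with h1 | ⟨x, hx, h2⟩
          · omega
          · exact absurd (‹∀ x ∈ offs (ci + L) r, x ≤ (il.length : Int)› x hx) (by omega)

theorem bounds_eq (ls : List Int) :
    ∀ (bs : List Int) (c : Int),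
      ls.foldl (fun bs length => bs ++ [bs.getLastD 0 + length]) (bs ++ [c]) = bs ++ c :: offs c ls := by
  induction ls with
  | nil => intro bs c; simp [offs]
  | cons L r ih =>
      intro bs c
      simp only [List.foldl_cons, offs]
      have h1 : (bs ++ [c]).getLastD 0 = c := by simp
      have h2 : bs ++ [c] ++ [c + L] = (bs ++ [c]) ++ [c + L] := by simp
      rw [h1, h2, ih (bs ++ [c]) (c + L)]
      simp

theorem lastD_offs (ls : List Int) : ∀ (c : Int), (c :: offs c ls).getLastD 0 = lastOff c ls := by
  induction ls with
  | nil => intro c; simp [offs, lastOff]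
  | cons L r ih => intro c; simpa [offs, lastOff] using ih (c + L)

theorem zip_offs (il : List Int) (ls : List Int) :
    ∀ (c : Int),
      ((c :: offs c ls).zip (offs c ls)).map (fun p => PySem.List.slice il (some p.1) (some p.2))
        = slicesOf il c ls := by
  induction ls with
  | nil => intro c; simp [offs, slicesOf]
  | cons L r ih => intro c; simpa [offs, slicesOf] using ih (c + L)

theorem alt_canon (il ls : List Int) :
    partition_list_alt il ls = (canon il 0 ls).getD [] := by
  unfold partition_list_alt canon
  have hb := bounds_eq ls [] 0
  simp only [List.nil_append] at hb
  rw [hb]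
  simp only [List.tail_cons, lastD_offs, zip_offs]

theorem partition_list_spec' (il ls : List Int) :
    partition_list il ls = partition_list_alt il ls := by
  rw [alt_canon, partition_list, partAuxA_canon]
  cases canon il 0 ls <;> simp

-- ===== VERDICT (by name: the statement is the Claim_ definition above) =====
theorem partition_list_spec : Claim_equal_partition_list := by
  intro il ls _ _
  unfold Spec_partition_list
  exact partition_list_spec' il ls
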